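-- pv_equiv track=rewrite | github.com/bradfiep/CS.067-Self-Organizing-AI-Agents-at-the-Edge | backend/maze_exploration.py | get_local_grid_view
-- ===== SOURCE A (Python) =====
-- from typing import List, Tuple
--
-- def get_local_grid_view(maze: List[List[int]], position: Tuple[int, int], radius: int = 1) -> List[List[int]]:
--     """
--     Extract a local grid view centered on the agent's position.
--
--     Args:
--         maze: Full maze grid
--         position: (x, y) agent position
--         radius: How many cells in each direction to include (default 1 = 3x3 view)
--
--     Returns:
--         2D array representing the local view
--     """
--     if not position:
--         return [[]]
--
--     x, y = position
--     rows = len(maze)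
--     cols = len(maze[0]) if rows > 0 else 0
--
--     # Extract view
--     view = []
--     for i in range(x - radius, x + radius + 1):
--         row = []
--         for j in range(y - radius, y + radius + 1):
--             if 0 <= i < rows and 0 <= j < cols:
--                 row.append(maze[i][j])
--             else:
--                 row.append(1)  # Treat out-of-bounds as walls
--         view.append(row)
--
--     return view
-- ===== SOURCE B (Python) =====
-- from typing import List, Tuple
--
-- def get_local_grid_view(maze: List[List[int]], position: Tuple[int, int], radius: int = 1) -> List[List[int]]:
--     """Local view as overlap bounds + per-row slice with wall padding (no per-cell bounds branch)."""
--     if not position: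
--         return [[]]
--     x, y = position
--     rows = len(maze)
--     cols = len(maze[0]) if rows > 0 else 0
--     lo = max(y - radius, 0)
--     hi = min(y + radius + 1, cols)
--     return [
--         [1] * (lo - (y - radius)) + maze[i][lo:hi] + [1] * ((y + radius + 1) - hi)
--         if 0 <= i < rows and lo < hi
--         else [1] * (2 * radius + 1)
--         for i in range(x - radius, x + radius + 1)
--     ]
-- ===== Notes on version B (the rewrite author's own statement) =====
-- stated objective: simpler
-- what changed: B replaces A's per-cell bounds test inside nested loops by precomputed row/column overlap bounds, building each output row as wall-padding ++ one slice of the maze row ++ wall-padding.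
import Mathlib
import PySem

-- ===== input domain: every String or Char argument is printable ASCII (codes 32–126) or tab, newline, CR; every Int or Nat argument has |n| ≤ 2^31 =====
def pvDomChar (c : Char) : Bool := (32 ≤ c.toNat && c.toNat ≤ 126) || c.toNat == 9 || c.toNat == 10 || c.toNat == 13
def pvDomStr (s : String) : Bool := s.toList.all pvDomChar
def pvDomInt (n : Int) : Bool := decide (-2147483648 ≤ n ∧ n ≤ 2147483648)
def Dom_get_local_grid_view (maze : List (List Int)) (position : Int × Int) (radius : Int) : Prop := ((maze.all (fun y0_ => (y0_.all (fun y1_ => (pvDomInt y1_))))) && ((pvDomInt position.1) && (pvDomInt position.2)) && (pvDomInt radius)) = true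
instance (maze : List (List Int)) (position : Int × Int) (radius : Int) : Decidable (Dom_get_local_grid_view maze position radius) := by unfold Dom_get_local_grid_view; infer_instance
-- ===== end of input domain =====

-- B computes the row/column overlap bounds once and builds each output row as wall-padding ++ a row slice,
-- replacing A's per-cell bounds test; objective: simpler (no per-cell branch), not measured faster.

-- ===== PORT A =====
def get_local_grid_view (maze : List (List Int)) (position : Int × Int) (radius : Int) : List (List Int) :=
  -- 'if not position' never fires: position is always a 2-tuple here
  let x := position.1
  let y := position.2
  let rows : Int := maze.length
  let cols : Int := if 0 < rows then ((PySem.List.pyGetD maze 0 []).length : Int) else 0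
  (PySem.List.pyRange (x - radius) (x + radius + 1) 1).foldl (fun view i =>
    view ++ [(PySem.List.pyRange (y - radius) (y + radius + 1) 1).foldl (fun row j =>
      row ++ [if 0 ≤ i ∧ i < rows ∧ 0 ≤ j ∧ j < cols
              then PySem.List.pyGetD (PySem.List.pyGetD maze i []) j 1
              else 1]) []]) []

-- ===== PORT B =====
def get_local_grid_view_alt (maze : List (List Int)) (position : Int × Int) (radius : Int) : List (List Int) :=
  let x := position.1
  let y := position.2
  let rows : Int := maze.length
  let cols : Int := if 0 < rows then ((PySem.List.pyGetD maze 0 []).length : Int) else 0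
  let lo := max (y - radius) 0
  let hi := min (y + radius + 1) cols
  (PySem.List.pyRange (x - radius) (x + radius + 1) 1).map (fun i =>
    if 0 ≤ i ∧ i < rows ∧ lo < hi then
      List.replicate (lo - (y - radius)).toNat (1 : Int)
        ++ PySem.List.slice (PySem.List.pyGetD maze i []) (some lo) (some hi)
        ++ List.replicate ((y + radius + 1) - hi).toNat (1 : Int)
    else
      List.replicate (2 * radius + 1).toNat (1 : Int))

-- ===== PRECONDITION & SPEC =====
-- Pre_ excludes exactly the ragged-maze inputs on which A raises IndexError: a window row i of the maze
-- shorter than the column overlap computed from len(maze[0]).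
def Pre_get_local_grid_view (maze : List (List Int)) (position : Int × Int) (radius : Int) : Prop :=
  ∀ p ∈ maze.zipIdx,
    (position.1 - radius ≤ (p.2 : Int) ∧ (p.2 : Int) ≤ position.1 + radius ∧
      max (position.2 - radius) 0 <
        min (position.2 + radius + 1) (if 0 < (maze.length : Int) then ((PySem.List.pyGetD maze 0 []).length : Int) else 0)) →
    min (position.2 + radius + 1) (if 0 < (maze.length : Int) then ((PySem.List.pyGetD maze 0 []).length : Int) else 0)
      ≤ (p.1.length : Int)
instance (maze : List (List Int)) (position : Int × Int) (radius : Int) : Decidable (Pre_get_local_grid_view maze position radius) := by unfold Pre_get_local_grid_view; infer_instance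
def pvWitness_get_local_grid_view : List (List Int) × (Int × Int) × Int := ([[0, 2], [3, 4]], (1, 1), 1)

def Spec_get_local_grid_view (maze : List (List Int)) (position : Int × Int) (radius : Int) (out : List (List Int)) : Prop := out = get_local_grid_view_alt maze position radius
instance (maze : List (List Int)) (position : Int × Int) (radius : Int) (out : List (List Int)) : Decidable (Spec_get_local_grid_view maze position radius out) := by unfold Spec_get_local_grid_view; infer_instance

-- ===== CLAIM (what is proved, stated in full; the proofs are below) =====
def Claim_equal_get_local_grid_view : Prop := ∀ (maze : List (List Int)) (position : Int × Int) (radius : Int), Dom_get_local_grid_view maze position radius → Pre_get_local_grid_view maze position radius → Spec_get_local_grid_view maze position radius (get_local_grid_view maze position radius)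

-- ===== LEMMAS AND PROOFS =====

-- a map of the constant 1 over an Int range is a replicate of its length
lemma map_const_one_pyRange (a b : Int) (f : Int → Int) (h : ∀ j, a ≤ j → j < b → f j = 1) :
    (PySem.List.pyRange a b 1).map f = List.replicate (b - a).toNat (1 : Int) := by
  have h1 : (PySem.List.pyRange a b 1).map f = (PySem.List.pyRange a b 1).map (fun _ => (1 : Int)) := by
    apply List.map_congr_left
    intro j hj
    rw [PySem.List.mem_pyRange_one] at hj
    exact h j hj.1 hj.2
  rw [h1, List.map_const', PySem.List.length_pyRange_one]

-- reading xs[j] for j over an in-bounds range is the slice xs[a:b]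
lemma map_pyGetD_pyRange_eq_slice (xs : List Int) (a b : Int) (ha : 0 ≤ a) (hab : a < b) (hb : b ≤ (xs.length : Int)) :
    (PySem.List.pyRange a b 1).map (fun j => PySem.List.pyGetD xs j 1) =
      PySem.List.slice xs (some a) (some b) := by
  have hsplit := PySem.List.pyRange_one_append a b (xs.length : Int) (le_of_lt hab) hb
  have hwhole := PySem.List.map_pyGetD_pyRange' xs (1 : Int) ha
  rw [hsplit, List.map_append] at hwhole
  have hlen1 : ((PySem.List.pyRange a b 1).map (fun j => PySem.List.pyGetD xs j 1)).length = (b - a).toNat := by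
    rw [List.length_map, PySem.List.length_pyRange_one]
  have htake := congrArg (fun l => List.take (b - a).toNat l) hwhole
  simp only at htake
  rw [← hlen1, List.take_left] at htake
  rw [htake, PySem.List.slice_toNat xs ha (by omega)]
  congr 1
  omega

-- ===== VERDICT (by name: the statement is the Claim_ definition above) =====
theorem get_local_grid_view_spec : Claim_equal_get_local_grid_view := by
  intro maze position radius _ hpre
  unfold Spec_get_local_grid_view get_local_grid_view get_local_grid_view_alt
  unfold Pre_get_local_grid_view at hpre
  simp only [PySem.List.foldl_append_singleton_eq_map, List.nil_append]
  apply List.map_congr_left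
  intro i hi
  rw [PySem.List.mem_pyRange_one] at hi
  set x := position.1 with hx
  set y := position.2 with hy
  set cols : Int := if 0 < (maze.length : Int) then ((PySem.List.pyGetD maze 0 []).length : Int) else 0 with hcols
  set lo : Int := max (y - radius) 0 with hlo
  set hi2 : Int := min (y + radius + 1) cols with hhi
  by_cases hib : 0 ≤ i ∧ i < (maze.length : Int) ∧ lo < hi2
  · obtain ⟨hi0, hirows, hlh⟩ := hib
    rw [if_pos ⟨hi0, hirows, hlh⟩]
    -- bounds for splitting the column range
    have h1 : y - radius ≤ lo := hlo ▸ le_max_left _ _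
    have h2 : lo ≤ hi2 := le_of_lt hlh
    have h3 : hi2 ≤ y + radius + 1 := hhi ▸ min_le_left _ _
    rw [PySem.List.pyRange_one_append (y - radius) lo (y + radius + 1) h1 (le_trans h2 h3),
      PySem.List.pyRange_one_append lo hi2 (y + radius + 1) h2 h3,
      List.map_append, List.map_append, List.append_assoc]
    -- the row we read from, and the Pre_ fact about its length
    have hirowsN : i.toNat < maze.length := by omega
    have hget : PySem.List.pyGetD maze i [] = maze[i.toNat] :=
      PySem.List.pyGetD_eq_getElem maze [] hi0 (by exact_mod_cast hirows)
    have hrowlen : hi2 ≤ ((PySem.List.pyGetD maze i []).length : Int) := by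
      have hmem : (PySem.List.pyGetD maze i [], i.toNat) ∈ maze.zipIdx := by
        rw [List.mem_zipIdx_iff_getElem?, hget]
        exact List.getElem?_eq_getElem hirowsN
      have hp := hpre _ hmem
      simp only at hp
      have hc : (i.toNat : Int) = i := by omega
      rw [hc] at hp
      exact hp ⟨by omega, by omega, hlh⟩
    congr 1
    · -- left wall padding
      rw [map_const_one_pyRange]
      intro j hj1 hj2
      rw [if_neg]
      rintro ⟨hj0, -, hjge, -⟩
      exact absurd hj2 (not_lt.mpr (hlo ▸ max_le hj1 hjge))
    congr 1
    · -- the in-bounds slice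
      have hmap : ((PySem.List.pyRange lo hi2 1).map fun j =>
          if 0 ≤ i ∧ i < (maze.length : Int) ∧ 0 ≤ j ∧ j < cols
          then PySem.List.pyGetD (PySem.List.pyGetD maze i []) j 1 else 1) =
          (PySem.List.pyRange lo hi2 1).map (fun j => PySem.List.pyGetD (PySem.List.pyGetD maze i []) j 1) := by
        apply List.map_congr_left
        intro j hj
        rw [PySem.List.mem_pyRange_one] at hj
        have hj0 : 0 ≤ j := le_trans (hlo ▸ le_max_right _ _) hj.1
        have hjc : j < cols := lt_of_lt_of_le hj.2 (hhi ▸ min_le_right _ _)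
        rw [if_pos ⟨hi0, hirows, hj0, hjc⟩]
      rw [hmap, map_pyGetD_pyRange_eq_slice (PySem.List.pyGetD maze i []) lo hi2 (hlo ▸ le_max_right _ _) hlh hrowlen]
    · -- right wall padding
      rw [map_const_one_pyRange]
      intro j hj1 hj2
      rw [if_neg]
      rintro ⟨-, -, hj0, hjc⟩
      exact absurd (hhi ▸ lt_min (lt_of_lt_of_le hj2 le_rfl) hjc : j < hi2) (not_lt.mpr hj1)
  · rw [if_neg hib]
    rw [map_const_one_pyRange]
    · congr 1
      omega
    · intro j hj1 hj2
      rw [if_neg]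
      rintro ⟨hi0, hirows, hj0, hjc⟩
      refine hib ⟨hi0, hirows, ?_⟩
      have hlo' : lo ≤ j := hlo ▸ max_le hj1 hj0
      have hhi' : j < hi2 := hhi ▸ lt_min hj2 hjc
      omega
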